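-- pv_equiv track=rewrite | github.com/Lonewolf124/-DrGViswanathan_challenge_Shreyas | Day_19/oct3_day19.py | check
-- ===== SOURCE A (Python) =====
-- def check(list1):
--     Tetrahedron=4
--     Cube= 6
--     Octahedron= 8
--     Dodecahedron=12
--     Icosahedron=20
--     count=0
--     for i in list1 :
--         if i == "Tetrahedron":
--             count+=Tetrahedron
--         elif i == "Octahedron":
--             count+=Octahedron
--         elif i == "Dodecahedron":
--             count+=Dodecahedron
--         elif i == "Cube":
--             count+=Cube
--         else:
--             count+=Icosahedron
--
--     return count
-- ===== SOURCE B (Python) =====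
-- def check(list1):
--     return (20 * len(list1)
--             + (4 - 20) * list1.count("Tetrahedron")
--             + (6 - 20) * list1.count("Cube")
--             + (8 - 20) * list1.count("Octahedron")
--             + (12 - 20) * list1.count("Dodecahedron"))
-- ===== Notes on version B (the rewrite author's own statement) =====
-- stated objective: alternative
-- what changed: Replaces the per-element if/elif accumulation loop with a closed-form 20*len baseline plus count-based deltas for the four explicitly named solids.
import Mathlib
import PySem

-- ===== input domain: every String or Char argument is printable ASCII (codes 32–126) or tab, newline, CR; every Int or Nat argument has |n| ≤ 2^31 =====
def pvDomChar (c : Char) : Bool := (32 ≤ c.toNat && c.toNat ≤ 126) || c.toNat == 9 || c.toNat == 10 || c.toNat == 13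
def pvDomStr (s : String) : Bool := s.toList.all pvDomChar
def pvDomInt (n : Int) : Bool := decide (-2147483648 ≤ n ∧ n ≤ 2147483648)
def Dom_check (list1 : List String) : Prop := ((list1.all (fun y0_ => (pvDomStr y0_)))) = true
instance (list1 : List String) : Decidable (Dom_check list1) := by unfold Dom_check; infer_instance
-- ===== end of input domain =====

-- B replaces A's per-element if/elif accumulation loop by a 20*length baseline plus count-based deltas for the four named solids.


-- ===== PORT A =====
def check (list1 : List String) : Int :=
  let Tetrahedron : Int := 4
  let Cube : Int := 6
  let Octahedron : Int := 8
  let Dodecahedron : Int := 12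
  let Icosahedron : Int := 20
  list1.foldl (fun count i =>
    if i == "Tetrahedron" then count + Tetrahedron
    else if i == "Octahedron" then count + Octahedron
    else if i == "Dodecahedron" then count + Dodecahedron
    else if i == "Cube" then count + Cube
    else count + Icosahedron) 0

-- ===== PORT B =====
def check_alt (list1 : List String) : Int :=
  20 * (list1.length : Int)
  + (4 - 20) * (PySem.List.count list1 "Tetrahedron" : Int)
  + (6 - 20) * (PySem.List.count list1 "Cube" : Int)
  + (8 - 20) * (PySem.List.count list1 "Octahedron" : Int)
  + (12 - 20) * (PySem.List.count list1 "Dodecahedron" : Int)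

-- ===== PRECONDITION & SPEC =====
def Spec_check (list1 : List String) (out : Int) : Prop := out = check_alt list1
instance (list1 : List String) (out : Int) : Decidable (Spec_check list1 out) := by unfold Spec_check; infer_instance

-- ===== CLAIM (what is proved, stated in full; the proofs are below) =====
def Claim_equal_check : Prop := ∀ (list1 : List String), Dom_check list1 → Spec_check list1 (check list1)

-- ===== LEMMAS AND PROOFS =====
theorem check_alt_cons (x : String) (xs : List String) :
    check_alt (x :: xs) =
      (if x == "Tetrahedron" then (4:Int)
       else if x == "Octahedron" then 8
       else if x == "Dodecahedron" then 12
       else if x == "Cube" then 6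
       else 20) + check_alt xs := by
  have e1 : (("Tetrahedron":String) == "Cube") = false := by decide
  have e2 : (("Tetrahedron":String) == "Octahedron") = false := by decide
  have e3 : (("Tetrahedron":String) == "Dodecahedron") = false := by decide
  have e4 : (("Octahedron":String) == "Tetrahedron") = false := by decide
  have e5 : (("Octahedron":String) == "Cube") = false := by decide
  have e6 : (("Octahedron":String) == "Dodecahedron") = false := by decide
  have e7 : (("Dodecahedron":String) == "Tetrahedron") = false := by decide
  have e8 : (("Dodecahedron":String) == "Cube") = false := by decide
  have e9 : (("Dodecahedron":String) == "Octahedron") = false := by decide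
  have e10 : (("Cube":String) == "Tetrahedron") = false := by decide
  have e11 : (("Cube":String) == "Octahedron") = false := by decide
  have e12 : (("Cube":String) == "Dodecahedron") = false := by decide
  by_cases h1 : x = "Tetrahedron"
  · subst h1
    simp only [check_alt, PySem.List.count_eq, List.count_cons, List.length_cons,
      beq_self_eq_true, e1, e2, e3, if_true]
    push_cast; ring
  by_cases h2 : x = "Octahedron"
  · subst h2
    simp only [check_alt, PySem.List.count_eq, List.count_cons, List.length_cons,
      beq_self_eq_true, e4, e5, e6, if_true]
    push_cast; ring
  by_cases h3 : x = "Dodecahedron"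
  · subst h3
    simp only [check_alt, PySem.List.count_eq, List.count_cons, List.length_cons,
      beq_self_eq_true, e7, e8, e9, if_true]
    push_cast; ring
  by_cases h4 : x = "Cube"
  · subst h4
    simp only [check_alt, PySem.List.count_eq, List.count_cons, List.length_cons,
      beq_self_eq_true, e10, e11, e12, if_true]
    push_cast; ring
  · have b1 : (x == "Tetrahedron") = false := by simpa using h1
    have b2 : (x == "Octahedron") = false := by simpa using h2
    have b3 : (x == "Dodecahedron") = false := by simpa using h3
    have b4 : (x == "Cube") = false := by simpa using h4
    simp only [check_alt, PySem.List.count_eq, List.count_cons, List.length_cons,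
      b1, b2, b3, b4]
    push_cast; ring

theorem check_foldl_shift (l : List String) (c : Int) :
    l.foldl (fun count i =>
      if i == "Tetrahedron" then count + 4
      else if i == "Octahedron" then count + 8
      else if i == "Dodecahedron" then count + 12
      else if i == "Cube" then count + 6
      else count + 20) c = c + check_alt l := by
  induction l generalizing c with
  | nil => simp [check_alt, PySem.List.count_eq]
  | cons x xs ih =>
    rw [List.foldl_cons, ih, check_alt_cons]
    split_ifs <;> ring

-- ===== VERDICT (by name: the statement is the Claim_ definition above) =====
theorem check_spec : Claim_equal_check := by
  intro l _
  unfold Spec_check check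
  simpa using check_foldl_shift l 0
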